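-- pv_equiv track=rewrite | github.com/npit/bdetools | buildjson.py | countPipes
-- ===== SOURCE A (Python) =====
-- def countPipes(line):
--     cols = 0
--     columWidths = []
--     widthcounter = 0
--     for char in line:
--         if char == '|':
--             columWidths.append(widthcounter)
--             widthcounter = 0
--             cols += 1
--         else:
--             widthcounter +=1
--     columWidths.append(widthcounter)
--     return (cols,columWidths)
-- ===== SOURCE B (Python) =====
-- def countPipes(line):
--     segments = line.split('|')
--     return (len(segments) - 1, [len(s) for s in segments])
-- ===== Notes on version B (the rewrite author's own statement) =====
-- stated objective: idiomatic
-- what changed: Replaces the character-by-character accumulator loop with a single str.split on the pipe separator followed by a length map: the pipe count is the number of segments minus one and each width is a segment length.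
import Mathlib
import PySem

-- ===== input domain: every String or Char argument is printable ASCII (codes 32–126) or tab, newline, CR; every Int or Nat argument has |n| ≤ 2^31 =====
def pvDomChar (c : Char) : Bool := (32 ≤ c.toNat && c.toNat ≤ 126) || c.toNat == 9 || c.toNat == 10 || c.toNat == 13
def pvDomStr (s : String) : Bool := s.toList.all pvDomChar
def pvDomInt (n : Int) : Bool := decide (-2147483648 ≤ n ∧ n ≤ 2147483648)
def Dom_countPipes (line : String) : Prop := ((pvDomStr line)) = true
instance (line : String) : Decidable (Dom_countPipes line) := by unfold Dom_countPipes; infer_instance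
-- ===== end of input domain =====

-- B replaces A's character accumulator loop by split('|') + length map (idiomatic decomposition).


-- ===== PORT A =====
-- the for-loop over the characters, with state (cols, columWidths, widthcounter)
def countPipesLoop : List Char → Int × List Int × Int → Int × List Int × Int
  | [], st => st
  | c :: rest, (cols, widths, wc) =>
      if c = '|' then countPipesLoop rest (cols + 1, widths ++ [wc], 0)
      else countPipesLoop rest (cols, widths, wc + 1)

def countPipes (line : String) : Int × List Int :=
  match countPipesLoop line.toList (0, [], 0) with
  | (cols, widths, wc) => (cols, widths ++ [wc])

-- ===== PORT B =====
def countPipes_alt (line : String) : Int × List Int :=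
  let segments := PySem.Chars.splitOn line.toList ['|']
  ((segments.length : Int) - 1, segments.map (fun s => (s.length : Int)))

-- ===== PRECONDITION & SPEC =====
def Spec_countPipes (line : String) (out : Int × List Int) : Prop := out = countPipes_alt line
instance (line : String) (out : Int × List Int) : Decidable (Spec_countPipes line out) := by unfold Spec_countPipes; infer_instance

-- ===== CLAIM (what is proved, stated in full; the proofs are below) =====
def Claim_equal_countPipes : Prop := ∀ (line : String), Dom_countPipes line → Spec_countPipes line (countPipes line)

-- ===== LEMMAS AND PROOFS =====

-- the segments of a list split on '|', structurally
def pvSegs : List Char → List (List Char)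
  | [] => [[]]
  | c :: rest => if c = '|' then [] :: pvSegs rest else (pvSegs rest).modifyHead (c :: ·)

theorem pvSegs_ne_nil (l : List Char) : pvSegs l ≠ [] := by
  induction l with
  | nil => simp [pvSegs]
  | cons c rest ih =>
    simp only [pvSegs]
    split_ifs
    · simp
    · cases h : pvSegs rest with
      | nil => exact absurd h ih
      | cons a t => simp [List.modifyHead]

theorem pvSegs_cons_exists (l : List Char) : ∃ a t, pvSegs l = a :: t := by
  cases hp : pvSegs l with
  | nil => exact absurd hp (pvSegs_ne_nil l)
  | cons a t => exact ⟨a, t, rfl⟩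

theorem pvSplitOn_go_single (l : List Char) : ∀ (fuel : Nat) (cur : List Char) (acc : List (List Char)),
    l.length < fuel →
    PySem.Chars.splitOn.go ['|'] fuel l cur acc
      = acc.reverse ++ (pvSegs l).modifyHead (cur.reverse ++ ·) := by
  induction l with
  | nil =>
    intro fuel cur acc h
    cases fuel with
    | zero => omega
    | succ f => simp [PySem.Chars.splitOn.go, pvSegs, List.modifyHead]
  | cons c rest ih =>
    intro fuel cur acc h
    cases fuel with
    | zero => omega
    | succ f =>
      simp only [List.length_cons] at h
      obtain ⟨a, t, ht⟩ := pvSegs_cons_exists rest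
      by_cases hc : c = '|'
      · subst hc
        have hstep : PySem.Chars.splitOn.go ['|'] (f+1) ('|'::rest) cur acc
            = PySem.Chars.splitOn.go ['|'] f rest [] (cur.reverse :: acc) := by
          simp [PySem.Chars.splitOn.go, List.isPrefixOf]
        rw [hstep, ih f [] (cur.reverse :: acc) (by omega)]
        simp [pvSegs, ht, List.modifyHead]
      · have hc' : ¬('|' = c) := fun h' => hc h'.symm
        have hstep : PySem.Chars.splitOn.go ['|'] (f+1) (c::rest) cur acc
            = PySem.Chars.splitOn.go ['|'] f rest (c :: cur) acc := by
          simp [PySem.Chars.splitOn.go, List.isPrefixOf, hc']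
        rw [hstep, ih f (c :: cur) acc (by omega)]
        simp [pvSegs, if_neg hc, ht, List.modifyHead]

theorem pvSplitOn_single (l : List Char) : PySem.Chars.splitOn l ['|'] = pvSegs l := by
  obtain ⟨a, t, ht⟩ := pvSegs_cons_exists l
  have := pvSplitOn_go_single l (l.length + 1) [] [] (by omega)
  simp [PySem.Chars.splitOn, this, ht, List.modifyHead]

theorem pvLoop_spec (l : List Char) : ∀ (cols : Int) (widths : List Int) (wc : Int),
    ((countPipesLoop l (cols, widths, wc)).1,
     (countPipesLoop l (cols, widths, wc)).2.1 ++ [(countPipesLoop l (cols, widths, wc)).2.2])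
    = (cols + ((pvSegs l).length : Int) - 1,
       widths ++ ((pvSegs l).map (fun s => (s.length : Int))).modifyHead (wc + ·)) := by
  induction l with
  | nil => intro cols widths wc; simp [countPipesLoop, pvSegs, List.modifyHead]
  | cons c rest ih =>
    intro cols widths wc
    obtain ⟨a, t, ht⟩ := pvSegs_cons_exists rest
    by_cases hc : c = '|'
    · subst hc
      simp only [countPipesLoop, if_true]
      rw [ih]
      simp [pvSegs, ht, List.modifyHead]
      ring
    · simp only [countPipesLoop, if_neg hc]
      rw [ih]
      simp [pvSegs, if_neg hc, ht, List.modifyHead]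
      ring

-- ===== VERDICT (by name: the statement is the Claim_ definition above) =====
theorem countPipes_spec : Claim_equal_countPipes := by
  intro line _
  unfold Spec_countPipes countPipes countPipes_alt
  rw [pvSplitOn_single]
  have h := pvLoop_spec line.toList 0 [] 0
  obtain ⟨a, t, ht⟩ := pvSegs_cons_exists line.toList
  rw [ht] at h ⊢
  cases hr : countPipesLoop line.toList (0, [], 0) with
  | mk cols rest2 =>
    cases rest2 with
    | mk widths wc =>
      rw [hr] at h
      simp only [List.modifyHead, List.map_cons, zero_add, List.nil_append] at h
      simp only [Prod.mk.injEq] at h ⊢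
      obtain ⟨h1, h2⟩ := h
      exact ⟨by omega, h2⟩
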